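-- pv_equiv track=rewrite | github.com/dlrowww/master-thesis-project | Ma/scripts/create_mongodb_data_layer.py | _collect_domain_and_descendants
-- ===== SOURCE A (Python) =====
-- from typing import Any, Dict, List, Optional, Set, Tuple
--
-- def _collect_domain_and_descendants(
--         domain: str,
--         ontology_bp: Dict[str, Any],
--         children_map: Dict[str, Set[str]],
--         class_to_collection: Dict[str, str],
-- ) -> List[str]:
--     """
--     Return the given domain plus all descendant classes that are routable
--     to Mongo collections in the current blueprint/validator setup.
--     """
--     out: List[str] = []
--     seen: Set[str] = set()
--     stack: List[str] = [domain]
--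
--     while stack:
--         current = stack.pop()
--         if current in seen:
--             continue
--         seen.add(current)
--
--         if current in class_to_collection:
--             out.append(current)
--
--         for child in children_map.get(current, set()):
--             if child not in seen:
--                 stack.append(child)
--
--     return out
-- ===== SOURCE B (Python) =====
-- from typing import Any, Dict, List, Set
--
--
-- def _collect_domain_and_descendants(
--         domain: str,
--         ontology_bp: Dict[str, Any],
--         children_map: Dict[str, Set[str]],
--         class_to_collection: Dict[str, str],
-- ) -> List[str]:
--     """
--     Return the given domain plus all descendant classes that are routable
--     to Mongo collections in the current blueprint/validator setup.
--     """
--     out: List[str] = []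
--     seen: Set[str] = set()
--
--     def visit(node: str) -> None:
--         if node in seen:
--             return
--         seen.add(node)
--         if node in class_to_collection:
--             out.append(node)
--         for child in reversed(list(children_map.get(node, set()))):
--             visit(child)
--
--     visit(domain)
--     return out
-- ===== Notes on version B (the rewrite author's own statement) =====
-- stated objective: alternative
-- what changed: Replaces the explicit LIFO work-stack loop (pop, seen-check, push unseen children) with a recursive depth-first visit helper that descends into each child directly, visiting children in reversed order so the discovery order is identical.
import Mathlib
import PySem

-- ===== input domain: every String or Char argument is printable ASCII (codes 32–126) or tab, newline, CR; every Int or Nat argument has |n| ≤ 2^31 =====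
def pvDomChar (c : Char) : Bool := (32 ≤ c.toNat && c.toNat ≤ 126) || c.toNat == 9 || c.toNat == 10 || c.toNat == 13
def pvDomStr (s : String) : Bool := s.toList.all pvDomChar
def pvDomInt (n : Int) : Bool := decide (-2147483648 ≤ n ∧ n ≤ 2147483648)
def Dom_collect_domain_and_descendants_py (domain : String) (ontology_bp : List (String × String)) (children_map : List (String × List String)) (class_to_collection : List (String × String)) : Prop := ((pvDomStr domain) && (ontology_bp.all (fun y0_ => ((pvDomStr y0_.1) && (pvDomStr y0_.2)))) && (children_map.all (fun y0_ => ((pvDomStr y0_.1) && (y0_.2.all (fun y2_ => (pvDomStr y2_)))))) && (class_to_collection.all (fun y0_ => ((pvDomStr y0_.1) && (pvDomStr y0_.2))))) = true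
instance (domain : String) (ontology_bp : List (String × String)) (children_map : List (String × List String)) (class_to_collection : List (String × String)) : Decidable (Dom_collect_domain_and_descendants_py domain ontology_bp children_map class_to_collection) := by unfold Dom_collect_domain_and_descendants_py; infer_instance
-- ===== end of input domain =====

-- B replaces A's explicit LIFO work-stack loop by a recursive depth-first visit helper
-- (children in reversed order), producing the same discovery order: objective 'alternative'.


-- ===== PORT A =====
-- children_map.get(current, set()) : first-match association-list lookup, default []
def pvKids (children_map : List (String × List String)) (c : String) : List String :=
  (List.lookup c children_map).getD []

-- the finite universe every node pushed on the stack lives in (used only for termination)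
def pvU (domain : String) (children_map : List (String × List String)) : List String :=
  PySem.List.dedup (domain :: children_map.flatMap (fun p => p.2))

-- termination measure: how many universe elements are still unseen
def pvB (U seen : List String) : Nat := (U.filter (fun u => u ∉ seen)).length

theorem pvKids_mem_flatMap (children_map : List (String × List String)) (a x : String)
    (hx : x ∈ pvKids children_map a) : x ∈ children_map.flatMap (fun p => p.2) := by
  unfold pvKids at hx
  cases hlk : List.lookup a children_map with
  | none => rw [hlk] at hx; simp at hx
  | some v =>
    rw [hlk] at hx; simp at hx
    have hmem : (a, v) ∈ children_map := by
      clear hx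
      induction children_map with
      | nil => simp [List.lookup] at hlk
      | cons hd tl ih =>
        rw [List.lookup] at hlk
        by_cases hk : a == hd.1
        · simp [hk] at hlk
          obtain ⟨k, w⟩ := hd
          have : a = k := LawfulBEq.eq_of_beq hk
          subst this; simp at hlk; subst hlk; exact List.mem_cons_self
        · simp [hk] at hlk; exact List.mem_cons_of_mem _ (ih hlk)
    exact List.mem_flatMap.mpr ⟨(a, v), hmem, hx⟩

theorem pvB_lt (U seen : List String) (c : String) (hcU : c ∈ U) (hc : c ∉ seen) :
    pvB U (PySem.Set.add seen c) < pvB U seen := by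
  unfold pvB
  rw [PySem.Set.add_of_not_mem hc]
  have hq : c ∈ U.filter (fun u => u ∉ seen) := List.mem_filter.mpr ⟨hcU, by simpa using hc⟩
  have hff : U.filter (fun u => u ∉ (seen ++ [c])) = (U.filter (fun u => u ∉ seen)).filter (fun u => u ∉ (seen ++ [c])) := by
    rw [List.filter_filter]
    apply List.filter_congr
    intro x _
    by_cases hx : x ∈ seen ++ [c] <;> by_cases hxs : x ∈ seen <;> simp_all
  rw [hff, List.length_filter_lt_length_iff_exists]
  exact ⟨c, hq, by simp⟩

-- the while-stack loop of A; the Python stack top (list end) is the HEAD of `stack` here,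
-- so `stack.pop()` is head-matching and the appended children arrive reversed at the head.
-- The extra arguments U/hU/hs only justify termination; they do not influence the value.
def pvLoopA (children_map : List (String × List String)) (class_to_collection : List (String × String))
    (U : List String) (hU : ∀ a x, x ∈ pvKids children_map a → x ∈ U)
    (stack : List String) (seen : PySem.Set String) (out : List String)
    (hs : ∀ x ∈ stack, x ∈ U) : List String :=
  match stack with
  | [] => out
  | c :: rest =>
    if hc : c ∈ seen then
      pvLoopA children_map class_to_collection U hU rest seen out
        (fun x hx => hs x (List.mem_cons_of_mem c hx))
    else
      pvLoopA children_map class_to_collection U hU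
        (((pvKids children_map c).filter (fun k => k ∉ PySem.Set.add seen c)).reverse ++ rest)
        (PySem.Set.add seen c)
        (if (List.lookup c class_to_collection).isSome then out ++ [c] else out)
        (by
          intro x hx
          rcases List.mem_append.mp hx with h | h
          · exact hU c x (List.mem_of_mem_filter (List.mem_reverse.mp h))
          · exact hs x (List.mem_cons_of_mem c h))
termination_by (pvB U seen, stack.length)
decreasing_by
  · exact Prod.Lex.right _ (by simp)
  · exact Prod.Lex.left _ _ (pvB_lt U seen c (hs c List.mem_cons_self) hc)

def collect_domain_and_descendants_py (domain : String) (ontology_bp : List (String × String)) (children_map : List (String × List String)) (class_to_collection : List (String × String)) : List String :=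
  pvLoopA children_map class_to_collection (pvU domain children_map)
    (fun a x hx => by
      unfold pvU
      rw [PySem.List.dedup_eq_ofList, PySem.Set.mem_ofList]
      exact List.mem_cons_of_mem _ (pvKids_mem_flatMap children_map a x hx))
    [domain] [] []
    (fun x hx => by
      unfold pvU
      rw [PySem.List.dedup_eq_ofList, PySem.Set.mem_ofList]
      simp at hx
      simp [hx])

-- ===== PORT B =====
-- the recursive `visit` of B; the Nat is a fuel guard that only makes the recursion
-- structurally total (it is never exhausted when started with pvU.length + 1).
def pvVisitB (children_map : List (String × List String)) (class_to_collection : List (String × String)) :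
    Nat → String → List String × PySem.Set String → List String × PySem.Set String
  | 0, _, st => st
  | n + 1, c, st =>
    if c ∈ st.2 then st
    else
      ((pvKids children_map c).reverse).foldl
        (fun s k => pvVisitB children_map class_to_collection n k s)
        ((if (List.lookup c class_to_collection).isSome then st.1 ++ [c] else st.1),
         PySem.Set.add st.2 c)

def collect_domain_and_descendants_py_alt (domain : String) (ontology_bp : List (String × String)) (children_map : List (String × List String)) (class_to_collection : List (String × String)) : List String :=
  (pvVisitB children_map class_to_collection ((pvU domain children_map).length + 1) domain ([], [])).1

-- ===== PRECONDITION & SPEC =====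
def Spec_collect_domain_and_descendants_py (domain : String) (ontology_bp : List (String × String)) (children_map : List (String × List String)) (class_to_collection : List (String × String)) (out : List String) : Prop := out = collect_domain_and_descendants_py_alt domain ontology_bp children_map class_to_collection
instance (domain : String) (ontology_bp : List (String × String)) (children_map : List (String × List String)) (class_to_collection : List (String × String)) (out : List String) : Decidable (Spec_collect_domain_and_descendants_py domain ontology_bp children_map class_to_collection out) := by unfold Spec_collect_domain_and_descendants_py; infer_instance

-- ===== CLAIM (what is proved, stated in full; the proofs are below) =====
def Claim_equal_collect_domain_and_descendants_py : Prop := ∀ (domain : String) (ontology_bp : List (String × String)) (children_map : List (String × List String)) (class_to_collection : List (String × String)), Dom_collect_domain_and_descendants_py domain ontology_bp children_map class_to_collection → Spec_collect_domain_and_descendants_py domain ontology_bp children_map class_to_collection (collect_domain_and_descendants_py domain ontology_bp children_map class_to_collection)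

-- ===== LEMMAS AND PROOFS =====

-- the seen-set only grows along a visit
theorem pvVisitB_mono (children_map : List (String × List String)) (class_to_collection : List (String × String)) :
    ∀ n c st, ∀ x ∈ st.2, x ∈ (pvVisitB children_map class_to_collection n c st).2 := by
  intro n
  induction n with
  | zero => intro c st x hx; simpa [pvVisitB] using hx
  | succ n ih =>
    intro c st x hx
    rw [pvVisitB]
    split
    · exact hx
    · have hfold : ∀ (l : List String) (s : List String × PySem.Set String), (∀ y ∈ s.2, y ∈ (l.foldl (fun s k => pvVisitB children_map class_to_collection n k s) s).2) := by
        intro l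
        induction l with
        | nil => intro s y hy; simpa using hy
        | cons a tl ihl =>
          intro s y hy
          simp only [List.foldl_cons]
          exact ihl _ y (ih a s y hy)
      exact hfold _ _ x (by simp [PySem.Set.mem_add]; exact Or.inl hx)

theorem pvB_mono (U : List String) (s t : List String) (h : ∀ x ∈ s, x ∈ t) : pvB U t ≤ pvB U s := by
  unfold pvB
  apply List.Sublist.length_le
  apply List.monotone_filter_right
  intro x hx
  simp at hx ⊢
  intro hxs; exact hx (h x hxs)

-- a visit of an already-seen node is the identity (any fuel)
theorem pvVisitB_seen (children_map : List (String × List String)) (class_to_collection : List (String × String))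
    (n : Nat) (c : String) (st : List String × PySem.Set String) (hc : c ∈ st.2) :
    pvVisitB children_map class_to_collection n c st = st := by
  cases n with
  | zero => rfl
  | succ n => rw [pvVisitB]; simp [hc]

-- any two sufficient fuels give the same visit
theorem pvVisitB_fuel (children_map : List (String × List String)) (class_to_collection : List (String × String))
    (U : List String) (hU : ∀ a x, x ∈ pvKids children_map a → x ∈ U) :
    ∀ m c st n₁ n₂, pvB U st.2 ≤ m → pvB U st.2 < n₁ → pvB U st.2 < n₂ → c ∈ U →
      pvVisitB children_map class_to_collection n₁ c st = pvVisitB children_map class_to_collection n₂ c st := by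
  intro m
  induction m using Nat.strong_induction_on with
  | _ m ihm =>
    intro c st n₁ n₂ hm h1 h2 hcU
    obtain ⟨a, rfl⟩ : ∃ a, n₁ = a + 1 := ⟨n₁ - 1, by omega⟩
    obtain ⟨b, rfl⟩ : ∃ b, n₂ = b + 1 := ⟨n₂ - 1, by omega⟩
    rw [pvVisitB, pvVisitB]
    split
    · rfl
    · rename_i hc
      have hlt : pvB U (PySem.Set.add st.2 c) < pvB U st.2 := pvB_lt U st.2 c hcU hc
      set st' : List String × PySem.Set String :=
        ((if (List.lookup c class_to_collection).isSome then st.1 ++ [c] else st.1), PySem.Set.add st.2 c) with hst'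
      have hlt' : pvB U st'.2 < pvB U st.2 := by rw [hst']; exact hlt
      have hfold : ∀ (l : List String), (∀ y ∈ l, y ∈ U) → ∀ (s : List String × PySem.Set String),
          pvB U s.2 ≤ pvB U st'.2 →
          l.foldl (fun s k => pvVisitB children_map class_to_collection a k s) s
            = l.foldl (fun s k => pvVisitB children_map class_to_collection b k s) s := by
        intro l hl
        induction l with
        | nil => intro s _; rfl
        | cons k tl ihl =>
          intro s hsB
          simp only [List.foldl_cons]
          have hkU : k ∈ U := hl k List.mem_cons_self
          have hBm : pvB U st'.2 < m := by omega
          have hstep : pvVisitB children_map class_to_collection a k s = pvVisitB children_map class_to_collection b k s := by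
            apply ihm (pvB U st'.2) hBm k s a b hsB (by omega) (by omega) hkU
          rw [hstep]
          apply ihl (fun y hy => hl y (List.mem_cons_of_mem _ hy))
          exact le_trans (pvB_mono U s.2 _ (pvVisitB_mono _ _ b k s)) hsB
      exact hfold _ (fun y hy => hU c y (List.mem_reverse.mp hy)) st' (le_refl _)

-- folding over the children filtered by the current seen-set equals folding over all of them
theorem pvVisitB_filter (children_map : List (String × List String)) (class_to_collection : List (String × String)) :
    ∀ (l : List String) (n : Nat) (st : List String × PySem.Set String) (s : List String),
      (∀ x ∈ s, x ∈ st.2) →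
      (l.filter (fun k => k ∉ s)).foldl (fun s k => pvVisitB children_map class_to_collection n k s) st
        = l.foldl (fun s k => pvVisitB children_map class_to_collection n k s) st := by
  intro l
  induction l with
  | nil => intro n st s _; rfl
  | cons k tl ih =>
    intro n st s hs
    by_cases hk : k ∈ s
    · have : pvVisitB children_map class_to_collection n k st = st := pvVisitB_seen _ _ n k st (hs k hk)
      simp only [List.filter_cons, hk, List.foldl_cons, this]
      exact ih n st s hs
    · simp only [List.filter_cons, hk, List.foldl_cons]
      apply ih
      intro x hx
      exact pvVisitB_mono _ _ n k st x (hs x hx)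

-- MAIN: A's stack loop equals folding B's visit over the stack (pop order)
theorem pvMain (children_map : List (String × List String)) (class_to_collection : List (String × String))
    (U : List String) (hU : ∀ a x, x ∈ pvKids children_map a → x ∈ U) :
    ∀ m stack seen out hs n, pvB U seen ≤ m → pvB U seen < n →
      pvLoopA children_map class_to_collection U hU stack seen out hs
        = (stack.foldl (fun s c => pvVisitB children_map class_to_collection n c s) (out, seen)).1 := by
  intro m
  induction m using Nat.strong_induction_on with
  | _ m ihm =>
    intro stack
    induction stack with
    | nil => intro seen out hs n _ _; rw [pvLoopA]; rfl
    | cons c rest ihs =>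
      intro seen out hs n hm hn
      rw [pvLoopA]
      by_cases hc : c ∈ seen
      · simp only [hc, dif_pos]
        rw [ihs seen out _ n hm hn]
        simp only [List.foldl_cons]
        rw [pvVisitB_seen _ _ n c (out, seen) hc]
      · simp only [hc, dif_neg, not_false_iff]
        have hcU : c ∈ U := hs c List.mem_cons_self
        have hlt : pvB U (PySem.Set.add seen c) < pvB U seen := pvB_lt U seen c hcU hc
        obtain ⟨a, rfl⟩ : ∃ a, n = a + 1 := ⟨n - 1, by omega⟩
        set out' : List String := if (List.lookup c class_to_collection).isSome then out ++ [c] else out with hout'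
        set seen' : PySem.Set String := PySem.Set.add seen c with hseen'
        have hrec := ihm (pvB U seen') (by omega)
          (((pvKids children_map c).filter (fun k => k ∉ seen')).reverse ++ rest)
          seen' out'
          (by
            intro x hx
            rcases List.mem_append.mp hx with h | h
            · exact hU c x (List.mem_of_mem_filter (List.mem_reverse.mp h))
            · exact hs x (List.mem_cons_of_mem c h))
          (a + 1) (le_refl _) (by omega)
        rw [hrec, List.foldl_append]
        simp only [List.foldl_cons]
        congr 1
        rw [pvVisitB]
        simp only [hc, if_neg, not_false_iff]
        rw [← List.filter_reverse]
        rw [pvVisitB_filter children_map class_to_collection ((pvKids children_map c).reverse) (a + 1) (out', seen') seen'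
          (fun x hx => hx)]
        have hfuel : ∀ (l : List String), (∀ y ∈ l, y ∈ U) → ∀ (s : List String × PySem.Set String),
            pvB U s.2 ≤ pvB U seen' →
            l.foldl (fun s k => pvVisitB children_map class_to_collection (a + 1) k s) s
              = l.foldl (fun s k => pvVisitB children_map class_to_collection a k s) s := by
          intro l hl
          induction l with
          | nil => intro s _; rfl
          | cons k tl ihl =>
            intro s hsB
            simp only [List.foldl_cons]
            have hstep : pvVisitB children_map class_to_collection (a + 1) k s = pvVisitB children_map class_to_collection a k s := by
              apply pvVisitB_fuel children_map class_to_collection U hU (pvB U seen') k s (a + 1) a hsB (by omega) (by omega)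
                (hl k List.mem_cons_self)
            rw [hstep]
            apply ihl (fun y hy => hl y (List.mem_cons_of_mem _ hy))
            exact le_trans (pvB_mono U s.2 _ (pvVisitB_mono _ _ a k s)) hsB
        rw [hfuel _ (fun y hy => hU c y (List.mem_reverse.mp hy)) (out', seen') (le_refl _)]

theorem pvB_empty (U : List String) : pvB U [] = U.length := by
  unfold pvB; simp

-- ===== VERDICT (by name: the statement is the Claim_ definition above) =====
theorem collect_domain_and_descendants_py_spec : Claim_equal_collect_domain_and_descendants_py := by
  intro domain ontology_bp children_map class_to_collection _
  unfold Spec_collect_domain_and_descendants_py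
  unfold collect_domain_and_descendants_py collect_domain_and_descendants_py_alt
  rw [pvMain children_map class_to_collection (pvU domain children_map) _
    ((pvU domain children_map).length) [domain] [] [] _ ((pvU domain children_map).length + 1)
    (by rw [pvB_empty]) (by rw [pvB_empty]; omega)]
  simp only [List.foldl_cons, List.foldl_nil]
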